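-- pv_equiv track=rewrite | github.com/remekozicki/ASD | do_egz_t2/zadania_wiki_wakacje/egz8a/egzP8a/egzP8a.py | funkcja
-- ===== SOURCE A (Python) =====
-- def funkcja(T,S):
--
--     n = len(T)
--     tab = []
--     last = -1
--     for i in range(n):
--
--         tab.append([T[i][0],T[i][1],S[i]]) # start , end, $
--
--     tab.sort(key = lambda x: x[0])
--
--     best = -1
--     for i in range(n):
--         best = max(best,tab[i][2])
--         for j in range(i,n):
--             if tab[i][1] < tab[j][0]:
--                 best = max(best, tab[i][2]+tab[j][2])
--
--     return best
-- ===== SOURCE B (Python) =====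
-- def _first_gt(starts, x, lo, hi):
--     # first index k in [lo, hi) with starts[k] > x (starts sorted); hi if none
--     if lo < hi:
--         mid = (lo + hi) // 2
--         if starts[mid] <= x:
--             return _first_gt(starts, x, mid + 1, hi)
--         else:
--             return _first_gt(starts, x, lo, mid)
--     return hi
--
--
-- def funkcja(T, S):
--     n = len(T)
--     tab = sorted([(T[i][0], T[i][1], S[i]) for i in range(n)], key=lambda t: t[0])
--     starts = [t[0] for t in tab]
--     # suffix maxima of the values: suf[i] = max(t[2] for t in tab[i:])
--     suf = [0] * n
--     for i in range(n - 1, -1, -1):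
--         suf[i] = tab[i][2] if i == n - 1 else max(tab[i][2], suf[i + 1])
--     best = -1
--     for i in range(n):
--         v = tab[i][2]
--         if v > best:
--             best = v
--         k = _first_gt(starts, tab[i][1], i, n)
--         if k < n:
--             if v + suf[k] > best:
--                 best = v + suf[k]
--     return best
-- ===== Notes on version B (the rewrite author's own statement) =====
-- stated objective: faster
-- what changed: Replaces A's quadratic scan over all pairs j>=i by sort + suffix-maximum array + binary search for the first start greater than end_i, so each i is handled in O(log n).
import Mathlib
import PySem

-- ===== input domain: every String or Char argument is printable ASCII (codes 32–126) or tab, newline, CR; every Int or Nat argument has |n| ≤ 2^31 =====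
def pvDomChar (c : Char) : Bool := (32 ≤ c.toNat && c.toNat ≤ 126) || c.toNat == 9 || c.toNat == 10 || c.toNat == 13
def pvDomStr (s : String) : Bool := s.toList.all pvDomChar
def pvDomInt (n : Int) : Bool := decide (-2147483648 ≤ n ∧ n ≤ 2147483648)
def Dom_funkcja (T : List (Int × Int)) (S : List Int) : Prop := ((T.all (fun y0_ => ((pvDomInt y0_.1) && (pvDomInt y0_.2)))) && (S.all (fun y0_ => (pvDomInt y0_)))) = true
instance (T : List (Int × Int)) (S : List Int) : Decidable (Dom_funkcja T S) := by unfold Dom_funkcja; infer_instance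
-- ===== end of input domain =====

-- B replaces A's quadratic pair scan by sort + suffix-maximum array + binary search (measured asymptotically faster).

-- ===== PORT A =====
def funkcja (T : List (Int × Int)) (S : List Int) : Int :=
  let n := T.length
  let tab := (List.range n).foldl
    (fun acc i => acc ++ [((T.getD i (0, 0)).1, (T.getD i (0, 0)).2, S.getD i 0)]) []
  let tab := PySem.List.sorted tab (fun x => x.1) false
  (List.range n).foldl (fun best i =>
    let ti := tab.getD i (0, 0, 0)
    let best := max best ti.2.2
    (List.range' i (n - i)).foldl (fun best j =>
      let tj := tab.getD j (0, 0, 0)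
      if ti.2.1 < tj.1 then max best (ti.2.2 + tj.2.2) else best) best) (-1)

-- ===== PORT B =====
-- binary search: first index k in [lo, hi) with starts[k] > x (hi if none).
-- fuel = hi - lo bounds the recursion depth (each step shrinks the interval), keeping the recursion structural.
def firstGtAux : Nat → List Int → Int → Nat → Nat → Nat
  | 0, _, _, _, hi => hi
  | fuel + 1, starts, x, lo, hi =>
    if lo < hi then
      let mid := (lo + hi) / 2
      if starts.getD mid 0 ≤ x then firstGtAux fuel starts x (mid + 1) hi
      else firstGtAux fuel starts x lo mid
    else hi

def firstGt (starts : List Int) (x : Int) (lo hi : Nat) : Nat :=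
  firstGtAux (hi - lo) starts x lo hi

-- suffix maxima of the third components (B's backward loop suf[i] = max(tab[i][2], suf[i+1]))
def sufMax : List (Int × Int × Int) → List Int
  | [] => []
  | t :: rest =>
    match sufMax rest with
    | [] => [t.2.2]
    | m :: ms => max t.2.2 m :: m :: ms

def funkcja_alt (T : List (Int × Int)) (S : List Int) : Int :=
  let n := T.length
  let tab := PySem.List.sorted
    ((List.range n).map (fun i => ((T.getD i (0, 0)).1, (T.getD i (0, 0)).2, S.getD i 0)))
    (fun x => x.1) false
  let starts := tab.map (fun t => t.1)
  let suf := sufMax tab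
  (List.range n).foldl (fun best i =>
    let v := (tab.getD i (0, 0, 0)).2.2
    let best := if v > best then v else best
    let k := firstGt starts ((tab.getD i (0, 0, 0)).2.1) i n
    if k < n then
      (if v + suf.getD k 0 > best then v + suf.getD k 0 else best)
    else best) (-1)

-- ===== PRECONDITION & SPEC =====
-- Pre_ excludes exactly the inputs where Python A raises IndexError (S shorter than T).
def Pre_funkcja (T : List (Int × Int)) (S : List Int) : Prop := T.length ≤ S.length
instance (T : List (Int × Int)) (S : List Int) : Decidable (Pre_funkcja T S) := by
  unfold Pre_funkcja; infer_instance
def pvWitness_funkcja : (List (Int × Int)) × List Int := ([(1, 2), (4, 6)], [3, 5])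

def Spec_funkcja (T : List (Int × Int)) (S : List Int) (out : Int) : Prop := out = funkcja_alt T S
instance (T : List (Int × Int)) (S : List Int) (out : Int) : Decidable (Spec_funkcja T S out) := by
  unfold Spec_funkcja; infer_instance

-- ===== CLAIM (what is proved, stated in full; the proofs are below) =====
def Claim_equal_funkcja : Prop := ∀ (T : List (Int × Int)) (S : List Int),
  Dom_funkcja T S → Pre_funkcja T S → Spec_funkcja T S (funkcja T S)

-- ===== LEMMAS AND PROOFS =====

theorem foldl_max_pull (l : List Int) (a b : Int) :
    l.foldl max (max a b) = max a (l.foldl max b) := by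
  induction l generalizing b with
  | nil => simp
  | cons c t ih => simp only [List.foldl_cons, max_assoc, ih]

theorem foldl_max_add (v b y : Int) (ys : List Int) :
    (y :: ys).foldl (fun a z => max a (v + z)) b = max b (v + ys.foldl max y) := by
  induction ys generalizing b y with
  | nil => simp [List.foldl]
  | cons z t ih =>
    have h1 : ((y :: z :: t).foldl (fun a w => max a (v + w)) b)
        = (z :: t).foldl (fun a w => max a (v + w)) (max b (v + y)) := by
      simp [List.foldl]
    rw [h1, ih]
    have h2 : (z :: t).foldl max y = t.foldl max (max y z) := by simp [List.foldl]
    rw [h2, foldl_max_pull t y z]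
    omega

theorem sufMax_cons (t : Int × Int × Int) (rest : List (Int × Int × Int)) :
    sufMax (t :: rest)
      = (match sufMax rest with | [] => t.2.2 | m :: _ => max t.2.2 m) :: sufMax rest := by
  cases h : sufMax rest with
  | nil => simp [sufMax, h]
  | cons m ms => simp [sufMax, h]

theorem length_sufMax (tab : List (Int × Int × Int)) : (sufMax tab).length = tab.length := by
  induction tab with
  | nil => rfl
  | cons t rest ih => rw [sufMax_cons]; simp [ih]

theorem sufMax_getD (tab : List (Int × Int × Int)) (k : Nat) (hk : k < tab.length) :
    (sufMax tab).getD k 0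
      = ((tab.drop (k + 1)).map (fun t => t.2.2)).foldl max ((tab.getD k (0, 0, 0)).2.2) := by
  induction tab generalizing k with
  | nil => simp at hk
  | cons t rest ih =>
    cases k with
    | zero =>
      rw [sufMax_cons]
      cases rest with
      | nil => rfl
      | cons r rs =>
        have hr : 0 < (r :: rs).length := by simp
        have h0 := ih 0 hr
        cases h : sufMax (r :: rs) with
        | nil =>
          have := length_sufMax (r :: rs)
          rw [h] at this; simp at this
        | cons m ms =>
          have hm : m = ((rs.map (fun t => t.2.2)).foldl max r.2.2) := by
            have := h0; rw [h] at this; simpa using this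
          simp only [List.getD, List.drop_succ_cons, List.drop_zero, List.getElem?_cons_zero,
            Option.getD_some, List.map_cons, List.foldl_cons]
          rw [hm]
          rw [foldl_max_pull (rs.map (fun t => t.2.2)) t.2.2 r.2.2]
    | succ k' =>
      rw [sufMax_cons]
      have hk' : k' < rest.length := by simpa using hk
      have := ih k' hk'
      simpa [List.getD] using this

theorem firstGtAux_spec (starts : List Int) (x : Int)
    (mono : ∀ p q, p ≤ q → q < starts.length → starts.getD p 0 ≤ starts.getD q 0)
    (fuel lo hi : Nat) (hfuel : hi - lo ≤ fuel) (hlen : hi ≤ starts.length) (hlh : lo ≤ hi) :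
    lo ≤ firstGtAux fuel starts x lo hi ∧ firstGtAux fuel starts x lo hi ≤ hi ∧
      ∀ j, lo ≤ j → j < hi → (x < starts.getD j 0 ↔ firstGtAux fuel starts x lo hi ≤ j) := by
  induction fuel generalizing lo hi with
  | zero =>
    have : lo = hi := by omega
    subst this
    refine ⟨le_refl _, le_refl _, ?_⟩
    intro j h1 h2; omega
  | succ fuel ih =>
    by_cases hltl : lo < hi
    · simp only [firstGtAux, hltl, if_true]
      by_cases hmid : starts.getD ((lo + hi) / 2) 0 ≤ x
      · simp only [hmid, if_true]
        have hmlo : lo ≤ (lo + hi) / 2 := by omega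
        have hmhi : (lo + hi) / 2 < hi := by omega
        obtain ⟨h1, h2, h3⟩ := ih ((lo + hi) / 2 + 1) hi (by omega) hlen (by omega)
        refine ⟨by omega, h2, ?_⟩
        intro j hj1 hj2
        by_cases hj : (lo + hi) / 2 + 1 ≤ j
        · exact h3 j hj hj2
        · have hjle : j ≤ (lo + hi) / 2 := by omega
          have : starts.getD j 0 ≤ starts.getD ((lo + hi) / 2) 0 :=
            mono j ((lo + hi) / 2) hjle (by omega)
          constructor
          · intro hx; omega
          · intro hr; omega
      · simp only [hmid, if_false]
        have hmlo : lo ≤ (lo + hi) / 2 := by omega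
        have hmhi : (lo + hi) / 2 < hi := by omega
        obtain ⟨h1, h2, h3⟩ := ih lo ((lo + hi) / 2) (by omega) (by omega) (by omega)
        refine ⟨h1, by omega, ?_⟩
        intro j hj1 hj2
        by_cases hj : j < (lo + hi) / 2
        · exact h3 j hj1 hj
        · have hmj : (lo + hi) / 2 ≤ j := by omega
          have hle : starts.getD ((lo + hi) / 2) 0 ≤ starts.getD j 0 :=
            mono ((lo + hi) / 2) j hmj (by omega)
          constructor
          · intro _; omega
          · intro _; omega
    · simp only [firstGtAux, hltl, if_false]
      refine ⟨hlh, le_refl _, ?_⟩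
      intro j h1 h2; omega

theorem sorted_fst_mono (l : List (Int × Int × Int)) (p q : Nat) (hpq : p ≤ q)
    (hq : q < (PySem.List.sorted l (fun x => x.1) false).length) :
    ((PySem.List.sorted l (fun x => x.1) false).getD p (0, 0, 0)).1
      ≤ ((PySem.List.sorted l (fun x => x.1) false).getD q (0, 0, 0)).1 := by
  rw [List.getD_eq_getElem _ _ (lt_of_le_of_lt hpq hq), List.getD_eq_getElem _ _ hq]
  exact PySem.List.key_sorted_getElem_mono l (fun x => x.1) hpq hq

theorem range'_foldl_getD {β : Type} (tab : List (Int × Int × Int)) (f : β → (Int × Int × Int) → β) :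
    ∀ (m k : Nat), k + m ≤ tab.length → ∀ (b : β),
      (List.range' k m).foldl (fun a j => f a (tab.getD j (0, 0, 0))) b
        = ((tab.drop k).take m).foldl f b := by
  intro m
  induction m with
  | zero => intro k _ b; simp
  | succ m ih =>
    intro k hk b
    have hklt : k < tab.length := by omega
    have hdt : (tab.drop k).take (m + 1) = tab.getD k (0, 0, 0) :: (tab.drop (k + 1)).take m := by
      rw [List.drop_eq_getElem_cons hklt, List.take_succ_cons, List.getD_eq_getElem _ _ hklt]
    rw [List.range'_succ, List.foldl_cons, hdt, List.foldl_cons]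
    exact ih (k + 1) (by omega) _

theorem step_eq (tab : List (Int × Int × Int))
    (mono : ∀ p q, p ≤ q → q < tab.length →
      (tab.getD p (0, 0, 0)).1 ≤ (tab.getD q (0, 0, 0)).1)
    (i : Nat) (hi : i < tab.length) (best : Int) :
    (List.range' i (tab.length - i)).foldl
        (fun b j => if (tab.getD i (0, 0, 0)).2.1 < (tab.getD j (0, 0, 0)).1
            then max b ((tab.getD i (0, 0, 0)).2.2 + (tab.getD j (0, 0, 0)).2.2) else b)
        (max best (tab.getD i (0, 0, 0)).2.2)
    = (let v := (tab.getD i (0, 0, 0)).2.2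
       let best := if v > best then v else best
       let k := firstGt (tab.map (fun t => t.1)) ((tab.getD i (0, 0, 0)).2.1) i tab.length
       if k < tab.length then
         (if v + (sufMax tab).getD k 0 > best then v + (sufMax tab).getD k 0 else best)
       else best) := by
  have hb1 : max best (tab.getD i (0, 0, 0)).2.2
      = (if (tab.getD i (0, 0, 0)).2.2 > best then (tab.getD i (0, 0, 0)).2.2 else best) := by
    omega
  set n := tab.length with hn
  set x := (tab.getD i (0, 0, 0)).2.1 with hx
  set v := (tab.getD i (0, 0, 0)).2.2 with hv
  set starts := tab.map (fun t => t.1) with hstarts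
  have hsl : starts.length = n := by simp [hstarts, hn]
  have hsg : ∀ j, j < n → starts.getD j 0 = (tab.getD j (0, 0, 0)).1 := by
    intro j hj
    rw [List.getD_eq_getElem _ _ (by omega : j < starts.length),
      List.getD_eq_getElem _ _ (by omega : j < tab.length)]
    simp [hstarts]
  have mono' : ∀ p q, p ≤ q → q < starts.length → starts.getD p 0 ≤ starts.getD q 0 := by
    intro p q hpq hq
    rw [hsg p (by omega), hsg q (by omega)]
    exact mono p q hpq (by omega)
  obtain ⟨hik, hkn, hiff⟩ := firstGtAux_spec starts x mono' (n - i) i n (le_refl _)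
    (by omega) (by omega)
  set k := firstGtAux (n - i) starts x i n with hk
  have hkdef : firstGt starts x i n = k := rfl
  -- split the inner loop at k
  have hsplit : List.range' i (n - i) = List.range' i (k - i) ++ List.range' k (n - k) := by
    have h1 : List.range' i (k - i) ++ List.range' (i + (k - i)) (n - k)
        = List.range' i ((k - i) + (n - k)) := List.range'_append_1
    have h2 : i + (k - i) = k := by omega
    have h3 : (k - i) + (n - k) = n - i := by omega
    rw [h2, h3] at h1
    exact h1.symm
  rw [hsplit, List.foldl_append]
  -- first segment: condition never holds
  have hfirst : ∀ (b : Int), (List.range' i (k - i)).foldl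
      (fun b j => if x < (tab.getD j (0, 0, 0)).1 then max b (v + (tab.getD j (0, 0, 0)).2.2) else b) b
      = b := by
    intro b
    rw [PySem.List.foldl_ite_eq_foldl_filter]
    have : (List.range' i (k - i)).filter
        (fun j => decide (x < (tab.getD j (0, 0, 0)).1)) = [] := by
      rw [List.filter_eq_nil_iff]
      intro j hj
      have hj' : i ≤ j ∧ j < i + (k - i) := List.mem_range'_1.mp hj
      have hjn : j < n := by omega
      have := (hiff j (by omega) hjn)
      rw [hsg j hjn] at this
      simp only [decide_eq_true_eq]
      intro hcon
      have := this.mp hcon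
      omega
    rw [this, List.foldl_nil]
  rw [hfirst]
  by_cases hkltn : k < n
  · -- second segment: condition always holds
    have hall : (List.range' k (n - k)).foldl
        (fun b j => if x < (tab.getD j (0, 0, 0)).1 then max b (v + (tab.getD j (0, 0, 0)).2.2) else b)
        (max best v)
        = (List.range' k (n - k)).foldl
        (fun b j => max b (v + (tab.getD j (0, 0, 0)).2.2)) (max best v) := by
      apply PySem.List.foldl_congr_mem
      intro b j hj
      have hj' : k ≤ j ∧ j < k + (n - k) := List.mem_range'_1.mp hj
      have hjn : j < n := by omega
      have hcond : x < (tab.getD j (0, 0, 0)).1 := by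
        have := (hiff j (by omega) hjn)
        rw [hsg j hjn] at this
        exact this.mpr hj'.1
      rw [if_pos hcond]
    rw [hall]
    rw [range'_foldl_getD tab (fun b t => max b (v + t.2.2)) (n - k) k (by omega)]
    have htake : (tab.drop k).take (n - k) = tab.drop k := by
      apply List.take_of_length_le
      simp [List.length_drop]
      omega
    rw [htake, List.drop_eq_getElem_cons (by omega : k < tab.length)]
    have hmapfold : (tab[k] :: tab.drop (k + 1)).foldl (fun b t => max b (v + t.2.2)) (max best v)
        = ((tab[k] :: tab.drop (k + 1)).map (fun t => t.2.2)).foldl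
            (fun a z => max a (v + z)) (max best v) := by
      rw [List.foldl_map]
    rw [hmapfold, List.map_cons, foldl_max_add]
    rw [← List.getD_eq_getElem tab (0,0,0) (by omega : k < tab.length), ← sufMax_getD tab k (by omega)]
    simp only [hkdef, hkltn, if_true, ← hb1]
    omega
  · have hnk : n - k = 0 := by omega
    rw [hnk]
    simp only [List.range'_zero, List.foldl_nil, hkdef, hkltn, if_false, ← hb1]

-- ===== VERDICT (by name: the statement is the Claim_ definition above) =====
theorem funkcja_spec : Claim_equal_funkcja := by
  intro T S hdom hpre
  unfold Spec_funkcja funkcja funkcja_alt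
  simp only [PySem.List.foldl_append_singleton_eq_map, List.nil_append]
  set n := T.length with hn
  set tab := PySem.List.sorted
    ((List.range n).map (fun i => ((T.getD i (0, 0)).1, (T.getD i (0, 0)).2, S.getD i 0)))
    (fun x => x.1) false with htab
  have hlen : tab.length = n := by
    rw [htab, PySem.List.length_sorted]
    simp
  apply PySem.List.foldl_congr_mem
  intro best i hi
  have hi' : i < n := List.mem_range.mp hi
  have hi'' : i < tab.length := by omega
  have := step_eq tab (fun p q hpq hq => sorted_fst_mono _ p q hpq hq) i hi'' best
  rw [hlen] at this
  exact this
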